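-- pv_equiv track=rewrite | github.com/vamonte/tracks_combination | main.py | check_tracks_length
-- ===== SOURCE A (Python) =====
-- import operator
-- from typing import List, Optional, Tuple
--
-- def validate_tracks_length(
--     tracks_length: Tuple[int],
--     indices: List[int],
--     min_length: int,
--     max_length: int,
--     tracks_count: int,
-- ):
--     tracks_list = tuple(tracks_length[i] for i in indices)
--     length = sum(tracks_list)
--     if (
--         length >= min_length
--         and length <= max_length
--         and tracks_count == len(tracks_list)
--     ):
--         return True
--     return False
--
-- def _check_tracks_length(
--     tracks_length: List[int],
--     min_length: int,
--     max_length: int,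
--     tracks_count: int,
-- ):
--     lower = operator.lt
--     if tracks_count == 1:
--         lower = operator.le
--
--     valid_tracks_length = tuple(
--         length for length in tracks_length if lower(length, max_length)
--     )
--
--     track_length_size = len(valid_tracks_length)
--     if track_length_size < tracks_count:
--         return False
--
--     indices = list(range(tracks_count))
--     if validate_tracks_length(
--         valid_tracks_length, indices, min_length, max_length, tracks_count
--     ):
--         return True
--
--     while True:
--         for i in reversed(range(tracks_count)):
--             if indices[i] != i + track_length_size - tracks_count:
--                 break
--         else:
--             return False
--         indices[i] += 1
--         for j in range(i + 1, tracks_count):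
--             indices[j] = indices[j - 1] + 1
--
--         if validate_tracks_length(
--             valid_tracks_length, indices, min_length, max_length, tracks_count
--         ):
--             return True
--
-- def init_tracks_count(tracks_length: List[int], tracks_count: Optional[int]) -> range:
--     res = [tracks_count]
--     if not tracks_count:
--         res = range(1, len(tracks_length) + 1)
--     return res
--
-- def check_tracks_length(
--     tracks_length: List[int],
--     concert_premiere_length: int,
--     tracks_count: Optional[int] = 3,
--     delta: int = 0,
-- ):
--     if tracks_count and len(tracks_length) < tracks_count:
--         return False
--
--     min_length = concert_premiere_length - delta
--     max_length = concert_premiere_length + delta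
--
--     for count in init_tracks_count(tracks_length, tracks_count):
--         if (
--             _check_tracks_length(
--                 tracks_length,
--                 min_length,
--                 max_length,
--                 count,
--             )
--             is True
--         ):
--             return True
--     else:
--         return False
-- ===== SOURCE B (Python) =====
-- def check_tracks_length(tracks_length, concert_premiere_length, tracks_count=3, delta=0):
--     # Subset-sum feasibility DP: layers[c] = the set of sums achievable by picking
--     # exactly c tracks; stop as soon as a wanted layer contains a sum in [lo, hi].
--     lo = concert_premiere_length - delta
--     hi = concert_premiere_length + delta
--
--     def single():
--         # is some track itself inside [lo, hi]?
--         return any(lo <= x <= hi for x in tracks_length)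
--
--     def hit(layer):
--         return any(lo <= s <= hi for s in layer)
--
--     def feasible(kmax, targets):
--         layers = [{0}] + [set() for _ in range(kmax)]
--         for x in [v for v in tracks_length if v < hi]:
--             layers = [layers[0]] + [cur | {s + x for s in prev}
--                                     for prev, cur in zip(layers, layers[1:])]
--             if any(hit(layers[c]) for c in targets):
--                 return True
--         return False
--
--     if tracks_count:
--         k = tracks_count
--         if k == 1:
--             return single()
--         if k < 0 or len(tracks_length) < k:
--             return False
--         return feasible(k, [k])
--     if single():
--         return True
--     n = len(tracks_length)
--     return feasible(n, range(2, n + 1))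
-- ===== Notes on version B (the rewrite author's own statement) =====
-- stated objective: alternative
-- what changed: A enumerates every k-element index combination in lexicographic order (itertools.combinations re-implemented by hand with a mutable index vector) and sums each one; B replaces that enumeration by a subset-sum feasibility DP maintaining, per element count, the set of achievable sums, returning as soon as a wanted layer contains a sum in range, and for the 'any count' case runs one DP instead of n separate enumerations.
import Mathlib
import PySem

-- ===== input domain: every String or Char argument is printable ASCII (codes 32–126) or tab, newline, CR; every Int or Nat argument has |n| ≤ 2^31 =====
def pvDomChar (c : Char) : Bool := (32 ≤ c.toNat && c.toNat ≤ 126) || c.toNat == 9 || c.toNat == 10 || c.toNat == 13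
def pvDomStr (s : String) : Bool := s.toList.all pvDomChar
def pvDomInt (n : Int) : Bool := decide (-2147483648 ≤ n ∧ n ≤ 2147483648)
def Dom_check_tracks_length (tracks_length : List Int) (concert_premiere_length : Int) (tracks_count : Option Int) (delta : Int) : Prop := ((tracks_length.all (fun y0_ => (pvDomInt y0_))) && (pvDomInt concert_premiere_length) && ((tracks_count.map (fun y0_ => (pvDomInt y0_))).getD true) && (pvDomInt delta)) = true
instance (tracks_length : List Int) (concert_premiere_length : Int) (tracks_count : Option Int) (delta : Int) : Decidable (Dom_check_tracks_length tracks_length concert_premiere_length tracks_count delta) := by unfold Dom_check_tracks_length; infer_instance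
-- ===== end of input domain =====

-- B replaces A's lexicographic enumeration of all k-element index combinations by a
-- subset-sum feasibility DP over (count, achievable sum); objective: alternative algorithm.

-- ===== PORT A =====
-- helper validate_tracks_length; every index the callers pass is in range, so the
-- IndexError case of pyGetD (Python tracks_length[i]) is unreachable
def validate_tracks_length (tracks_length : List Int) (indices : List Int)
    (min_length max_length tracks_count : Int) : Bool :=
  let tracks_list := indices.map (fun i => PySem.List.pyGetD tracks_length i 0)
  let length := tracks_list.sum
  if min_length ≤ length ∧ length ≤ max_length ∧ tracks_count = (tracks_list.length : Int)
  then true else false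

-- 'for i in reversed(range(tracks_count)): if indices[i] != i + size - count: break'
-- (none = the for-loop's else clause was reached)
def pvFindBreak (indices : List Int) (track_length_size tracks_count : Int) : Option Int :=
  (PySem.List.pyRange 0 tracks_count 1).reverse.find?
    (fun i => PySem.List.pyGetD indices i 0 != i + track_length_size - tracks_count)

-- 'indices[i] += 1; for j in range(i+1, tracks_count): indices[j] = indices[j-1] + 1'
def pvBump (indices : List Int) (i tracks_count : Int) : List Int :=
  let ind := PySem.List.pySetD indices i (PySem.List.pyGetD indices i 0 + 1)
  (PySem.List.pyRange (i + 1) tracks_count 1).foldl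
    (fun ind j => PySem.List.pySetD ind j (PySem.List.pyGetD ind (j - 1) 0 + 1)) ind

-- the 'while True' loop of _check_tracks_length; fuel only makes it total: the loop
-- steps lexicographically through the combinations, so the supplied fuel is never exhausted
def pvLoopA (valid_tracks : List Int) (min_length max_length tracks_count track_length_size : Int) :
    Nat → List Int → Bool
  | 0, _ => false
  | fuel + 1, indices =>
    match pvFindBreak indices track_length_size tracks_count with
    | none => false
    | some i =>
      let indices' := pvBump indices i tracks_count
      if validate_tracks_length valid_tracks indices' min_length max_length tracks_count
      then true
      else pvLoopA valid_tracks min_length max_length tracks_count track_length_size fuel indices'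

-- _check_tracks_length
def pvCheckOne (tracks_length : List Int) (min_length max_length tracks_count : Int) : Bool :=
  let valid_tracks := tracks_length.filter (fun len =>
    if tracks_count = 1 then decide (len ≤ max_length) else decide (len < max_length))
  let track_length_size : Int := valid_tracks.length
  if track_length_size < tracks_count then false
  else
    let indices := PySem.List.pyRange 0 tracks_count 1
    if validate_tracks_length valid_tracks indices min_length max_length tracks_count then true
    else pvLoopA valid_tracks min_length max_length tracks_count track_length_size
           ((track_length_size.toNat + 1) ^ (tracks_count.toNat + 1)) indices

def init_tracks_count (tracks_length : List Int) (tracks_count : Option Int) : List Int :=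
  match tracks_count with
  | some k => if k = 0 then PySem.List.pyRange 1 ((tracks_length.length : Int) + 1) 1 else [k]
  | none => PySem.List.pyRange 1 ((tracks_length.length : Int) + 1) 1

def check_tracks_length (tracks_length : List Int) (concert_premiere_length : Int)
    (tracks_count : Option Int) (delta : Int) : Bool :=
  let truthy : Bool := match tracks_count with | some k => k != 0 | none => false
  if truthy && decide ((tracks_length.length : Int) < tracks_count.getD 0) then false
  else
    let min_length := concert_premiere_length - delta
    let max_length := concert_premiere_length + delta
    (init_tracks_count tracks_length tracks_count).any (fun count =>
      pvCheckOne tracks_length min_length max_length count)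

-- ===== PORT B =====
def pvSingle (tracks_length : List Int) (lo hi : Int) : Bool :=
  tracks_length.any (fun x => decide (lo ≤ x) && decide (x ≤ hi))

-- 'layers = [layers[0]] + [cur | {s + x for s in prev} for prev, cur in zip(layers, layers[1:])]'
-- (layers is always nonempty, so layers[0] never raises; headD's default is a formality)
def pvDpStep (layers : List (PySem.Set Int)) (x : Int) : List (PySem.Set Int) :=
  layers.headD PySem.Set.empty ::
    (layers.zip layers.tail).map (fun pc => PySem.Set.union pc.2 (pc.1.map (fun s => s + x)))

def pvHit (layer : PySem.Set Int) (lo hi : Int) : Bool :=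
  layer.any (fun s => decide (lo ≤ s) && decide (s ≤ hi))

-- 'layers = [{0}] + [set() for _ in range(kmax)]'
def pvDpInit (kmax : Nat) : List (PySem.Set Int) :=
  PySem.Set.ofList [0] :: List.replicate kmax PySem.Set.empty

-- 'any(hit(layers[c]) for c in targets)'
def pvLayerHitAny (layers : List (PySem.Set Int)) (targets : List Int) (lo hi : Int) : Bool :=
  targets.any (fun c => pvHit (PySem.List.pyGetD layers c PySem.Set.empty) lo hi)

-- the loop body of feasible: step the layers, return True on a hit, else continue
def pvFeasible (lo hi : Int) (targets : List Int) : List Int → List (PySem.Set Int) → Bool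
  | [], _ => false
  | x :: rest, layers =>
    let layers' := pvDpStep layers x
    if pvLayerHitAny layers' targets lo hi then true
    else pvFeasible lo hi targets rest layers'

-- 'feasible(kmax, targets)' (the filtered value list is what the loop iterates over)
def pvFeasibleTop (tracks_length : List Int) (lo hi : Int) (kmax : Nat) (targets : List Int) : Bool :=
  pvFeasible lo hi targets (tracks_length.filter (fun v => decide (v < hi))) (pvDpInit kmax)

-- the 'tracks_count is None or 0' branch of B
def pvAnyCount (tracks_length : List Int) (lo hi : Int) : Bool :=
  if pvSingle tracks_length lo hi = true then true
  else
    let n := tracks_length.length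
    pvFeasibleTop tracks_length lo hi n (PySem.List.pyRange 2 ((n : Int) + 1) 1)

def check_tracks_length_alt (tracks_length : List Int) (concert_premiere_length : Int)
    (tracks_count : Option Int) (delta : Int) : Bool :=
  let lo := concert_premiere_length - delta
  let hi := concert_premiere_length + delta
  match tracks_count with
  | none => pvAnyCount tracks_length lo hi
  | some k =>
    if k = 0 then pvAnyCount tracks_length lo hi
    else if k = 1 then pvSingle tracks_length lo hi
    else if k < 0 ∨ (tracks_length.length : Int) < k then false
    else pvFeasibleTop tracks_length lo hi k.toNat [k]

-- ===== PRECONDITION & SPEC =====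
def Spec_check_tracks_length (tracks_length : List Int) (concert_premiere_length : Int) (tracks_count : Option Int) (delta : Int) (out : Bool) : Prop := out = check_tracks_length_alt tracks_length concert_premiere_length tracks_count delta
instance (tracks_length : List Int) (concert_premiere_length : Int) (tracks_count : Option Int) (delta : Int) (out : Bool) : Decidable (Spec_check_tracks_length tracks_length concert_premiere_length tracks_count delta out) := by unfold Spec_check_tracks_length; infer_instance

-- ===== CLAIM (what is proved, stated in full; the proofs are below) =====
def Claim_equal_check_tracks_length : Prop := ∀ (tracks_length : List Int) (concert_premiere_length : Int) (tracks_count : Option Int) (delta : Int), Dom_check_tracks_length tracks_length concert_premiere_length tracks_count delta → Spec_check_tracks_length tracks_length concert_premiere_length tracks_count delta (check_tracks_length tracks_length concert_premiere_length tracks_count delta)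

-- ===== LEMMAS AND PROOFS =====

def pvDpLayers (tracks_length : List Int) (hi : Int) (kmax : Nat) : List (PySem.Set Int) :=
  (tracks_length.filter (fun v => decide (v < hi))).foldl pvDpStep (pvDpInit kmax)

def pvGood (V : List Int) (lo hi : Int) (c : Nat) : Prop :=
  ∃ sub : List Int, sub.Sublist V ∧ sub.length = c ∧ lo ≤ sub.sum ∧ sub.sum ≤ hi

def pvDpInv (p : List Int) (k : Nat) (L : List (PySem.Set Int)) : Prop :=
  L.length = k + 1 ∧ ∀ c : Nat, c < k + 1 → ∀ s : Int,
    s ∈ L.getD c PySem.Set.empty ↔ ∃ sub : List Int, sub.Sublist p ∧ sub.length = c ∧ sub.sum = s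

lemma pvDpInv_init (k : Nat) : pvDpInv [] k (PySem.Set.ofList [0] :: List.replicate k PySem.Set.empty) := by
  constructor
  · simp
  · intro c hc s
    cases c with
    | zero =>
      simp [PySem.Set.ofList, PySem.Set.add, PySem.Set.contains, PySem.Set.empty]
      exact eq_comm
    | succ c =>
      have h1 : (PySem.Set.ofList [0] :: List.replicate k (PySem.Set.empty (α := Int))).getD (c+1) PySem.Set.empty = PySem.Set.empty := by
        simp [List.getD]
      rw [h1]
      simp [PySem.Set.empty]

lemma pvSublist_concat_iff (p : List Int) (x : Int) (sub : List Int) :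
    sub.Sublist (p ++ [x]) ↔ sub.Sublist p ∨ ∃ q : List Int, q.Sublist p ∧ sub = q ++ [x] := by
  rw [List.sublist_append_iff]
  constructor
  · rintro ⟨l1, l2, rfl, h1, h2⟩
    rcases List.sublist_singleton.mp h2 with rfl | rfl
    · left; simpa using h1
    · right; exact ⟨l1, h1, rfl⟩
  · rintro (h | ⟨q, hq, rfl⟩)
    · exact ⟨sub, [], by simp, h, List.nil_sublist _⟩
    · exact ⟨q, [x], rfl, hq, List.Sublist.refl _⟩


lemma pvDpStep_length (L : List (PySem.Set Int)) (x : Int) (k : Nat) (hlen : L.length = k + 1) :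
    (pvDpStep L x).length = k + 1 := by
  simp [pvDpStep, List.length_zip, List.length_tail, hlen]

lemma pvDpStep_getD_zero (L : List (PySem.Set Int)) (x : Int) (k : Nat) (hlen : L.length = k + 1) :
    (pvDpStep L x).getD 0 PySem.Set.empty = L[0]'(by omega) := by
  cases L with
  | nil => simp at hlen
  | cons a t => simp [pvDpStep]

lemma pvDpStep_getD_succ (L : List (PySem.Set Int)) (x : Int) (k c : Nat) (hlen : L.length = k + 1)
    (hc : c + 1 < k + 1) :
    (pvDpStep L x).getD (c+1) PySem.Set.empty =
      PySem.Set.union (L[c+1]'(by omega)) ((L[c]'(by omega)).map (fun s => s + x)) := by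
  have hzl : (L.zip L.tail).length = k := by
    simp [List.length_zip, List.length_tail, hlen]
  have hmap : ((L.zip L.tail).map (fun pc => PySem.Set.union pc.2 (pc.1.map (fun s => s + x)))).getD c PySem.Set.empty
      = PySem.Set.union ((L.zip L.tail)[c]'(by omega)).2 (((L.zip L.tail)[c]'(by omega)).1.map (fun s => s + x)) := by
    rw [List.getD_eq_getElem _ _ (by simp [hzl]; omega)]
    simp
  have hz : (L.zip L.tail)[c]'(by omega) = (L[c]'(by omega), L[c+1]'(by omega)) := by
    rw [List.getElem_zip]
    rw [Prod.ext_iff]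
    exact ⟨rfl, List.getElem_tail ..⟩
  simp only [pvDpStep, List.getD_cons_succ]
  rw [hmap, hz]

lemma pvDpStep_inv (p : List Int) (k : Nat) (L : List (PySem.Set Int)) (x : Int)
    (h : pvDpInv p k L) : pvDpInv (p ++ [x]) k (pvDpStep L x) := by
  obtain ⟨hlen, hmem⟩ := h
  refine ⟨pvDpStep_length L x k hlen, ?_⟩
  intro c hc s
  have hgetD : ∀ j : Nat, ∀ hj : j < k + 1, L.getD j PySem.Set.empty = L[j]'(by omega) :=
    fun j hj => List.getD_eq_getElem L _ (by omega)
  cases c with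
  | zero =>
    rw [pvDpStep_getD_zero L x k hlen, ← hgetD 0 (by omega), hmem 0 (by omega) s]
    constructor
    · rintro ⟨sub, hs, hl, hsum⟩
      exact ⟨sub, hs.trans (by simp), hl, hsum⟩
    · rintro ⟨sub, hs, hl, hsum⟩
      rw [List.length_eq_zero_iff] at hl; subst hl
      exact ⟨[], List.nil_sublist _, rfl, hsum⟩
  | succ c =>
    rw [pvDpStep_getD_succ L x k c hlen hc]
    rw [PySem.Set.mem_union]
    rw [← hgetD (c+1) hc, ← hgetD c (by omega), hmem (c+1) hc s]
    have hmapmem : s ∈ (L.getD c PySem.Set.empty).map (fun s => s + x) ↔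
        ∃ q : List Int, q.Sublist p ∧ q.length = c ∧ q.sum = s - x := by
      rw [List.mem_map]
      constructor
      · rintro ⟨t, ht, rfl⟩
        obtain ⟨q, hq, hql, hqs⟩ := (hmem c (by omega) t).mp ht
        exact ⟨q, hq, hql, by omega⟩
      · rintro ⟨q, hq, hql, hqs⟩
        exact ⟨s - x, (hmem c (by omega) (s - x)).mpr ⟨q, hq, hql, hqs⟩, by ring⟩
    rw [hmapmem]
    constructor
    · rintro (⟨sub, hs, hl, hsum⟩ | ⟨q, hq, hql, hqs⟩)
      · exact ⟨sub, hs.trans (by simp), hl, hsum⟩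
      · exact ⟨q ++ [x], (pvSublist_concat_iff p x _).mpr (Or.inr ⟨q, hq, rfl⟩), by simp [hql], by simp; omega⟩
    · rintro ⟨sub, hs, hl, hsum⟩
      rcases (pvSublist_concat_iff p x sub).mp hs with h | ⟨q, hq, rfl⟩
      · exact Or.inl ⟨sub, h, hl, hsum⟩
      · refine Or.inr ⟨q, hq, by simpa using hl, by simp at hsum; omega⟩

lemma pvDpLayers_inv (vals : List Int) (hi : Int) (k : Nat) :
    pvDpInv (vals.filter (fun v => decide (v < hi))) k (pvDpLayers vals hi k) := by
  rw [pvDpLayers, pvDpInit]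
  generalize vals.filter (fun v => decide (v < hi)) = l
  induction l using List.reverseRecOn with
  | nil => exact pvDpInv_init k
  | append_singleton l x ih =>
    rw [List.foldl_append, List.foldl_cons, List.foldl_nil]
    exact pvDpStep_inv l k _ x ih

lemma pvHit_iff (layer : PySem.Set Int) (lo hi : Int) :
    pvHit layer lo hi = true ↔ ∃ s ∈ layer, lo ≤ s ∧ s ≤ hi := by
  simp [pvHit, List.any_eq_true]

lemma pvSingle_iff (tl : List Int) (lo hi : Int) :
    pvSingle tl lo hi = true ↔ ∃ x ∈ tl, lo ≤ x ∧ x ≤ hi := by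
  simp [pvSingle, List.any_eq_true]

lemma pvHit_step_mono (L : List (PySem.Set Int)) (x : Int) (c : Nat) (lo hi : Int)
    (h : pvHit (L.getD c PySem.Set.empty) lo hi = true) :
    pvHit ((pvDpStep L x).getD c PySem.Set.empty) lo hi = true := by
  obtain ⟨s, hs, h1, h2⟩ := (pvHit_iff _ lo hi).mp h
  have hcL : c < L.length := by
    by_contra hc
    rw [List.getD_eq_default _ _ (by omega)] at hs
    simp [PySem.Set.empty] at hs
  rw [pvHit_iff]
  cases c with
  | zero =>
    rw [pvDpStep_getD_zero L x (L.length - 1) (by omega)]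
    refine ⟨s, ?_, h1, h2⟩
    rw [List.getD_eq_getElem _ _ hcL] at hs
    exact hs
  | succ c =>
    rw [pvDpStep_getD_succ L x (L.length - 1) c (by omega) (by omega)]
    refine ⟨s, ?_, h1, h2⟩
    rw [PySem.Set.mem_union]
    left
    rw [List.getD_eq_getElem _ _ hcL] at hs
    exact hs

lemma pvHit_fold_mono (ts : List Int) (L : List (PySem.Set Int)) (c : Nat) (lo hi : Int)
    (h : pvHit (L.getD c PySem.Set.empty) lo hi = true) :
    pvHit ((ts.foldl pvDpStep L).getD c PySem.Set.empty) lo hi = true := by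
  induction ts generalizing L with
  | nil => exact h
  | cons x rest ih => exact ih (pvDpStep L x) (pvHit_step_mono L x c lo hi h)

lemma pvFeasible_iff (lo hi : Int) (targets ts : List Int) (L : List (PySem.Set Int))
    (hpos : ∀ c ∈ targets, 0 ≤ c)
    (hno : pvLayerHitAny L targets lo hi = false) :
    pvFeasible lo hi targets ts L = true ↔
      pvLayerHitAny (ts.foldl pvDpStep L) targets lo hi = true := by
  induction ts generalizing L with
  | nil => simp [pvFeasible, hno]
  | cons x rest ih =>
    simp only [pvFeasible, List.foldl_cons]
    by_cases hh : pvLayerHitAny (pvDpStep L x) targets lo hi = true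
    · rw [if_pos hh]
      simp only [true_iff]
      rw [pvLayerHitAny, List.any_eq_true] at hh ⊢
      obtain ⟨c, hc, hcarry⟩ := hh
      refine ⟨c, hc, ?_⟩
      have h0 := hpos c hc
      have hc' : c = ((c.toNat : Nat) : Int) := by omega
      rw [hc', PySem.List.pyGetD_natCast] at hcarry ⊢
      exact pvHit_fold_mono rest (pvDpStep L x) c.toNat lo hi hcarry
    · rw [if_neg hh]
      exact ih (pvDpStep L x) (Bool.eq_false_iff.mpr hh)

lemma pvDpInit_no_hit (kmax : Nat) (targets : List Int) (lo hi : Int)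
    (hpos : ∀ c ∈ targets, 1 ≤ c) :
    pvLayerHitAny (pvDpInit kmax) targets lo hi = false := by
  rw [pvLayerHitAny]
  rw [Bool.eq_false_iff]
  intro hany
  rw [List.any_eq_true] at hany
  obtain ⟨c, hc, hhit⟩ := hany
  have h1 := hpos c hc
  have hc' : c = ((c.toNat : Nat) : Int) := by omega
  rw [hc', PySem.List.pyGetD_natCast] at hhit
  have hempty : (pvDpInit kmax).getD c.toNat PySem.Set.empty = PySem.Set.empty := by
    rw [pvDpInit]
    obtain ⟨m, hm⟩ : ∃ m, c.toNat = m + 1 := ⟨c.toNat - 1, by omega⟩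
    rw [hm, List.getD_cons_succ]
    rcases Nat.lt_or_ge m kmax with h | h
    · rw [List.getD_eq_getElem _ _ (by simpa using h)]
      simp
    · rw [List.getD_eq_default _ _ (by simpa using h)]
  rw [hempty] at hhit
  simp [pvHit, PySem.Set.empty] at hhit

lemma pvFeasibleTop_iff (tl : List Int) (lo hi : Int) (kmax : Nat) (targets : List Int)
    (hpos : ∀ c ∈ targets, 1 ≤ c) :
    pvFeasibleTop tl lo hi kmax targets = true ↔
      pvLayerHitAny (pvDpLayers tl hi kmax) targets lo hi = true := by
  rw [pvFeasibleTop, pvDpLayers]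
  exact pvFeasible_iff lo hi targets _ _ (fun c hc => le_trans (by omega) (hpos c hc))
    (pvDpInit_no_hit kmax targets lo hi hpos)

-- ========== A-side machinery ==========
def pvMaxI (N K t : Nat) : Int := (t : Int) + (N : Int) - (K : Int)

def pvValid (N K : Nat) (ind : List Int) : Prop :=
  ind.length = K ∧ (∀ t, t < K → (t : Int) ≤ ind.getD t 0 ∧ ind.getD t 0 ≤ pvMaxI N K t) ∧
  (∀ t, t + 1 < K → ind.getD t 0 < ind.getD (t + 1) 0)

def pvLexGt (c ind : List Int) : Prop :=
  ∃ p : Nat, (∀ q, q < p → c.getD q 0 = ind.getD q 0) ∧ ind.getD p 0 < c.getD p 0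

def pvISum (V ind : List Int) : Int := (ind.map (fun i => PySem.List.pyGetD V i 0)).sum

def pvM (N K : Nat) (ind : List Int) : Nat :=
  ∑ t ∈ Finset.range K, (pvMaxI N K t - ind.getD t 0).toNat * (N + 1) ^ (K - 1 - t)

lemma pvFindRevRange_none (K : Nat) (q : Nat → Bool) :
    ((List.range K).reverse.find? q = none) ↔ ∀ t, t < K → q t = false := by
  rw [List.find?_eq_none]
  simp

lemma pvFindRevRange_some (K : Nat) (q : Nat → Bool) (t : Nat)
    (h : (List.range K).reverse.find? q = some t) :
    q t = true ∧ t < K ∧ ∀ u, t < u → u < K → q u = false := by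
  induction K with
  | zero => simp at h
  | succ K ih =>
    rw [List.range_succ, List.reverse_append] at h
    simp only [List.reverse_singleton, List.singleton_append, List.find?_cons] at h
    rcases hqK : q K with _ | _
    · rw [hqK] at h
      simp at h
      obtain ⟨hq, ht, hall⟩ := ih h
      exact ⟨hq, by omega, fun u hu1 hu2 => by
        rcases Nat.lt_or_ge u K with h' | h'
        · exact hall u hu1 h'
        · have : u = K := by omega
          subst this; exact hqK⟩
    · rw [hqK] at h
      simp at h
      subst h
      exact ⟨hqK, by omega, fun u hu1 hu2 => by omega⟩

lemma pvFindBreak_eq (ind : List Int) (N K : Nat) :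
    pvFindBreak ind (N : Int) (K : Int) =
      ((List.range K).reverse.find?
        (fun t => ind.getD t 0 != (t : Int) + (N : Int) - (K : Int))).map (fun t => (t : Int)) := by
  have hpred : ((fun i : Int => (PySem.List.pyGetD ind i 0 != i + (N : Int) - (K : Int))) ∘
      (fun k : Nat => (k : Int))) = (fun t : Nat => ind.getD t 0 != (t : Int) + (N : Int) - (K : Int)) := by
    funext t
    simp [PySem.List.pyGetD_natCast]
  rw [pvFindBreak, PySem.List.pyRange_zero_natCast, ← List.map_reverse, List.find?_map, hpred]
  generalize (List.range K).reverse.find? (fun t => ind.getD t 0 != (t : Int) + (N : Int) - (K : Int)) = o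
  cases o <;> rfl

lemma pvFindBreak_none (ind : List Int) (N K : Nat) :
    pvFindBreak ind (N : Int) (K : Int) = none ↔ ∀ t, t < K → ind.getD t 0 = pvMaxI N K t := by
  rw [pvFindBreak_eq]
  rcases hf : (List.range K).reverse.find? (fun t => ind.getD t 0 != (t : Int) + (N : Int) - (K : Int)) with _ | t
  · constructor
    · intro _ t ht
      have := (pvFindRevRange_none K _).mp hf t ht
      simpa [pvMaxI] using this
    · intro _; rfl
  · constructor
    · intro h; simp at h
    · intro h
      obtain ⟨hq, ht, -⟩ := pvFindRevRange_some K _ t hf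
      exfalso
      have := h t ht
      simp [pvMaxI] at this
      simp [this] at hq

lemma pvFindBreak_some (ind : List Int) (N K : Nat) (i : Int)
    (h : pvFindBreak ind (N : Int) (K : Int) = some i) :
    ∃ I : Nat, i = (I : Int) ∧ I < K ∧ ind.getD I 0 ≠ pvMaxI N K I ∧
      ∀ t, I < t → t < K → ind.getD t 0 = pvMaxI N K t := by
  rw [pvFindBreak_eq] at h
  rcases hf : (List.range K).reverse.find? (fun t => ind.getD t 0 != (t : Int) + (N : Int) - (K : Int)) with _ | I
  · rw [hf] at h; simp at h
  · rw [hf] at h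
    simp at h
    obtain ⟨hq, hI, hall⟩ := pvFindRevRange_some K _ I hf
    refine ⟨I, h.symm, hI, by simpa [pvMaxI] using hq, fun t ht1 ht2 => ?_⟩
    have := hall t ht1 ht2
    simpa [pvMaxI] using this

lemma pvGetD_set_ne (l : List Int) (i j : Nat) (v : Int) (h : j ≠ i) :
    (l.set i v).getD j 0 = l.getD j 0 := by
  simp [List.getD, List.getElem?_set_ne (fun he => h he.symm)]

lemma pvGetD_set_self (l : List Int) (i : Nat) (v : Int) (h : i < l.length) :
    (l.set i v).getD i 0 = v := by
  rw [List.getD_eq_getElem _ _ (by simp [h])]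
  simp

lemma pvBumpFold (K : Nat) : ∀ (m J : Nat) (a : List Int), K - J = m → a.length = K → 1 ≤ J → J ≤ K →
    ((PySem.List.pyRange (J : Int) (K : Int) 1).foldl
      (fun ind j => PySem.List.pySetD ind j (PySem.List.pyGetD ind (j - 1) 0 + 1)) a).length = K ∧
    ∀ t, t < K → ((PySem.List.pyRange (J : Int) (K : Int) 1).foldl
      (fun ind j => PySem.List.pySetD ind j (PySem.List.pyGetD ind (j - 1) 0 + 1)) a).getD t 0 =
      if t < J then a.getD t 0 else a.getD (J - 1) 0 + 1 + ((t - J : Nat) : Int) := by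
  intro m
  induction m with
  | zero =>
    intro J a hm hlen h1 h2
    have hJK : J = K := by omega
    subst hJK
    rw [PySem.List.pyRange_one_eq_nil (by omega)]
    simp only [List.foldl_nil]
    exact ⟨hlen, fun t ht => by rw [if_pos ht]⟩
  | succ m ih =>
    intro J a hm hlen h1 h2
    have hJK : J < K := by omega
    rw [PySem.List.pyRange_one_cons (by exact_mod_cast hJK)]
    rw [List.foldl_cons]
    have hcast1 : (J : Int) + 1 = ((J + 1 : Nat) : Int) := by push_cast; ring
    have hcast2 : (J : Int) - 1 = ((J - 1 : Nat) : Int) := by omega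
    have hsetd : PySem.List.pySetD a (J : Int) (PySem.List.pyGetD a ((J : Int) - 1) 0 + 1) =
        a.set J (a.getD (J - 1) 0 + 1) := by
      rw [hcast2, PySem.List.pyGetD_natCast, PySem.List.pySetD_natCast]
    rw [hsetd, hcast1]
    have hlen1 : (a.set J (a.getD (J - 1) 0 + 1)).length = K := by simp [hlen]
    obtain ⟨hrl, hrg⟩ := ih (J + 1) (a.set J (a.getD (J - 1) 0 + 1)) (by omega) hlen1 (by omega) (by omega)
    refine ⟨hrl, fun t ht => ?_⟩
    rw [hrg t ht]
    rcases Nat.lt_trichotomy t J with h | h | h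
    · rw [if_pos (by omega), if_pos h, pvGetD_set_ne _ _ _ _ (by omega)]
    · subst h
      rw [if_pos (by omega), if_neg (by omega)]
      rw [pvGetD_set_self _ _ _ (by omega)]
      simp
    · rw [if_neg (by omega), if_neg (by omega)]
      have e1 : (a.set J (a.getD (J - 1) 0 + 1)).getD (J + 1 - 1) 0 = a.getD (J - 1) 0 + 1 := by
        have : J + 1 - 1 = J := by omega
        rw [this, pvGetD_set_self _ _ _ (by omega)]
      rw [e1]
      have : ((t - J : Nat) : Int) = ((t - (J + 1) : Nat) : Int) + 1 := by omega
      rw [this]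
      ring

lemma pvBump_eq_fold (ind : List Int) (K I : Nat) :
    pvBump ind (I : Int) (K : Int) =
      (PySem.List.pyRange ((I + 1 : Nat) : Int) (K : Int) 1).foldl
        (fun ind j => PySem.List.pySetD ind j (PySem.List.pyGetD ind (j - 1) 0 + 1))
        (ind.set I (ind.getD I 0 + 1)) := by
  rw [pvBump]
  rw [PySem.List.pyGetD_natCast, PySem.List.pySetD_natCast]
  have : (I : Int) + 1 = ((I + 1 : Nat) : Int) := by push_cast; ring
  rw [this]

lemma pvBump_length (ind : List Int) (K I : Nat) (hlen : ind.length = K) (hI : I < K) :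
    (pvBump ind (I : Int) (K : Int)).length = K := by
  rw [pvBump_eq_fold ind K I]
  exact (pvBumpFold K (K - (I + 1)) (I + 1) _ rfl (by simp [hlen]) (by omega) (by omega)).1

lemma pvBump_getD (ind : List Int) (K I : Nat) (hlen : ind.length = K) (hI : I < K) :
    ∀ t, t < K → (pvBump ind (I : Int) (K : Int)).getD t 0 =
      if t < I then ind.getD t 0 else ind.getD I 0 + 1 + ((t - I : Nat) : Int) := by
  intro t ht
  rw [pvBump_eq_fold ind K I]
  have h := (pvBumpFold K (K - (I + 1)) (I + 1) (ind.set I (ind.getD I 0 + 1)) rfl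
    (by simp [hlen]) (by omega) (by omega)).2 t ht
  rw [h]
  rcases Nat.lt_trichotomy t I with hti | hti | hti
  · rw [if_pos (by omega), if_pos hti, pvGetD_set_ne _ _ _ _ (by omega)]
  · subst hti
    rw [if_pos (by omega), if_neg (by omega), pvGetD_set_self _ _ _ (by omega)]
    simp
  · rw [if_neg (by omega), if_neg (by omega)]
    have e0 : I + 1 - 1 = I := by omega
    rw [e0, pvGetD_set_self _ _ _ (by omega)]
    have : ((t - I : Nat) : Int) = ((t - (I + 1) : Nat) : Int) + 1 := by omega
    rw [this]
    ring

lemma pvValidate_iff (V ind : List Int) (lo hi : Int) (K : Nat) (hlen : ind.length = K) :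
    validate_tracks_length V ind lo hi (K : Int) = true ↔
      lo ≤ pvISum V ind ∧ pvISum V ind ≤ hi := by
  simp [validate_tracks_length, pvISum, hlen]

lemma pvLexGt_trans (a b c : List Int) (h1 : pvLexGt a b) (h2 : pvLexGt b c) : pvLexGt a c := by
  obtain ⟨p1, hag1, hlt1⟩ := h1
  obtain ⟨p2, hag2, hlt2⟩ := h2
  rcases Nat.lt_trichotomy p1 p2 with h | h | h
  · exact ⟨p1, fun q hq => (hag1 q hq).trans (hag2 q (by omega)), by rw [← hag2 p1 h]; exact hlt1⟩
  · subst h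
    exact ⟨p1, fun q hq => (hag1 q hq).trans (hag2 q hq), by omega⟩
  · exact ⟨p2, fun q hq => (hag1 q (by omega)).trans (hag2 q hq), by rw [hag1 p2 h]; exact hlt2⟩

lemma pvLexGt_of_pointwise (c b : List Int) (K : Nat) (hc : c.length = K) (hb : b.length = K)
    (hle : ∀ t, t < K → b.getD t 0 ≤ c.getD t 0) (hne : c ≠ b) : pvLexGt c b := by
  induction c generalizing b K with
  | nil =>
    cases b with
    | nil => exact absurd rfl hne
    | cons y b' => simp [← hb] at hc
  | cons x c' ih =>
    cases b with
    | nil => simp [← hb] at hc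
    | cons y b' =>
      by_cases hxy : x = y
      · subst hxy
        have hne' : c' ≠ b' := fun h => hne (by rw [h])
        have hc' : c'.length = K - 1 := by simp at hc; omega
        have hb' : b'.length = K - 1 := by simp at hb; omega
        have hle' : ∀ t, t < K - 1 → b'.getD t 0 ≤ c'.getD t 0 := by
          intro t ht
          have := hle (t + 1) (by simp at hc; omega)
          simpa [List.getD_cons_succ] using this
        obtain ⟨p, hag, hlt⟩ := ih (K := K - 1) (b := b') hc' hb' hle' hne'
        refine ⟨p + 1, fun q hq => ?_, by simpa [List.getD_cons_succ] using hlt⟩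
        cases q with
        | zero => simp
        | succ q => simpa [List.getD_cons_succ] using hag q (by omega)
      · have h0 := hle 0 (by simp at hc; omega)
        simp at h0
        exact ⟨0, fun q hq => by omega, by simp; omega⟩

-- data of a successful findBreak
def pvBreakAt (N K I : Nat) (ind : List Int) : Prop :=
  I < K ∧ ind.getD I 0 ≠ pvMaxI N K I ∧ ∀ t, I < t → t < K → ind.getD t 0 = pvMaxI N K t

lemma pvBump_valid (ind : List Int) (N K I : Nat) (hv : pvValid N K ind)
    (hbr : pvBreakAt N K I ind) : pvValid N K (pvBump ind (I : Int) (K : Int)) := by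
  obtain ⟨hlen, hbd, hinc⟩ := hv
  obtain ⟨hIK, hne, hmax⟩ := hbr
  have hIlt : ind.getD I 0 < pvMaxI N K I := lt_of_le_of_ne (hbd I hIK).2 hne
  have hg := pvBump_getD ind K I hlen hIK
  refine ⟨pvBump_length ind K I hlen hIK, ?_, ?_⟩
  · intro t ht
    rw [hg t ht]
    split_ifs with h
    · exact hbd t ht
    · have hIt : I ≤ t := by omega
      have hcast : ((t - I : Nat) : Int) = (t : Int) - (I : Int) := by omega
      rw [hcast]
      have h1 := (hbd I hIK).1
      constructor
      · omega
      · simp only [pvMaxI] at hIlt ⊢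
        omega
  · intro t ht
    rw [hg t (by omega), hg (t + 1) ht]
    rcases Nat.lt_trichotomy (t + 1) I with h | h | h
    · rw [if_pos (by omega), if_pos h]
      exact hinc t ht
    · rw [if_pos (by omega), if_neg (by omega)]
      have hc0 : ((t + 1 - I : Nat) : Int) = 0 := by omega
      rw [hc0]
      have h2 := hinc t ht
      have hIe : I = t + 1 := by omega
      rw [hIe]
      omega
    · rw [if_neg (by omega), if_neg (by omega)]
      have c1 : ((t + 1 - I : Nat) : Int) = ((t - I : Nat) : Int) + 1 := by omega
      rw [c1]
      omega

lemma pvBump_lexGt (ind : List Int) (N K I : Nat) (hv : pvValid N K ind)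
    (hbr : pvBreakAt N K I ind) : pvLexGt (pvBump ind (I : Int) (K : Int)) ind := by
  obtain ⟨hlen, hbd, hinc⟩ := hv
  obtain ⟨hIK, hne, hmax⟩ := hbr
  have hg := pvBump_getD ind K I hlen hIK
  refine ⟨I, fun q hq => ?_, ?_⟩
  · rw [hg q (by omega), if_pos hq]
  · rw [hg I hIK, if_neg (by omega)]
    simp

lemma pvNoSkip (ind c : List Int) (N K I : Nat) (hv : pvValid N K ind)
    (hbr : pvBreakAt N K I ind) (hc : pvValid N K c) (hgt : pvLexGt c ind) :
    pvLexGt c (pvBump ind (I : Int) (K : Int)) ∨ c = pvBump ind (I : Int) (K : Int) := by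
  obtain ⟨hlen, hbd, hinc⟩ := hv
  obtain ⟨hIK, hne, hmax⟩ := hbr
  obtain ⟨hclen, hcbd, hcinc⟩ := hc
  have hg := pvBump_getD ind K I hlen hIK
  obtain ⟨p, hag, hlt⟩ := hgt
  have hpK : p < K := by
    by_contra hpK
    rw [List.getD_eq_default _ _ (by omega), List.getD_eq_default _ _ (by omega)] at hlt
    exact absurd hlt (by simp)
  rcases Nat.lt_trichotomy p I with hpI | hpI | hpI
  · left
    refine ⟨p, fun q hq => ?_, ?_⟩
    · rw [hg q (by omega), if_pos (by omega)]
      exact hag q hq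
    · rw [hg p (by omega), if_pos hpI]
      exact hlt
  · -- I = I : pointwise comparison from position I on
    obtain rfl : I = p := hpI.symm
    have hbv := pvBump_valid ind N K I ⟨hlen, hbd, hinc⟩ ⟨hIK, hne, hmax⟩
    have hblen : (pvBump ind (I : Int) (K : Int)).length = K := pvBump_length ind K I hlen hIK
    have key : ∀ d : Nat, I + d < K →
        (pvBump ind (I : Int) (K : Int)).getD (I + d) 0 ≤ c.getD (I + d) 0 := by
      intro d
      induction d with
      | zero =>
        intro h0
        simp only [Nat.add_zero]
        rw [hg I (by omega), if_neg (by omega)]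
        simpa using hlt
      | succ d ihd =>
        intro hd
        have h1 := ihd (by omega)
        have h2 := hcinc (I + d) (by omega)
        rw [hg (I + d) (by omega), if_neg (by omega)] at h1
        rw [hg (I + (d + 1)) (by omega), if_neg (by omega)]
        have c1 : ((I + (d + 1) - I : Nat) : Int) = ((I + d - I : Nat) : Int) + 1 := by omega
        rw [c1]
        have : I + d + 1 = I + (d + 1) := by omega
        rw [this] at h2
        omega
    have hptw : ∀ t, t < K → (pvBump ind (I : Int) (K : Int)).getD t 0 ≤ c.getD t 0 := by
      intro t ht
      rcases Nat.lt_or_ge t I with h | h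
      · rw [hg t ht, if_pos h, ← hag t h]
      · have : t = I + (t - I) := by omega
        rw [this]
        exact key (t - I) (by omega)
    by_cases hceq : c = pvBump ind (I : Int) (K : Int)
    · right; exact hceq
    · left; exact pvLexGt_of_pointwise c _ K hclen hblen hptw hceq
  · -- p > I impossible : c p would exceed the maximum
    exfalso
    have hpmax := hmax p hpI hpK
    rw [hpmax] at hlt
    exact absurd (hcbd p hpK).2 (by omega)

lemma pvAllMax_top (ind c : List Int) (N K : Nat) (hlen : ind.length = K)
    (hmax : ∀ t, t < K → ind.getD t 0 = pvMaxI N K t) (hc : pvValid N K c) :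
    ¬ pvLexGt c ind := by
  rintro ⟨p, hag, hlt⟩
  obtain ⟨hclen, hcbd, hcinc⟩ := hc
  rcases Nat.lt_or_ge p K with hpK | hpK
  · rw [hmax p hpK] at hlt
    exact absurd (hcbd p hpK).2 (by omega)
  · rw [List.getD_eq_default _ _ (by omega), List.getD_eq_default _ _ (by omega)] at hlt
    exact absurd hlt (by simp)

lemma pvGeomSum (N m : Nat) : ∑ j ∈ Finset.range m, N * (N + 1) ^ j + 1 = (N + 1) ^ m := by
  induction m with
  | zero => simp
  | succ m ih =>
    rw [Finset.sum_range_succ, pow_succ]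
    have : ∑ j ∈ Finset.range m, N * (N + 1) ^ j = (N + 1) ^ m - 1 := by omega
    rw [this]
    have h1 : 1 ≤ (N + 1) ^ m := Nat.one_le_pow _ _ (by omega)
    nlinarith

lemma pvDigitLt (N K I : Nat) (f g : Nat → Nat) (hI : I < K)
    (hagree : ∀ t, t < I → f t = g t) (hfg : f I < g I) (hbound : ∀ t, t < K → f t ≤ N) :
    ∑ t ∈ Finset.range K, f t * (N + 1) ^ (K - 1 - t) <
      ∑ t ∈ Finset.range K, g t * (N + 1) ^ (K - 1 - t) := by
  have hsplit : ∀ h : Nat → Nat, ∑ t ∈ Finset.range K, h t =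
      ∑ t ∈ Finset.range I, h t + h I + ∑ t ∈ Finset.Ico (I + 1) K, h t := by
    intro h
    rw [← Finset.sum_range_add_sum_Ico h (show I + 1 ≤ K by omega), Finset.sum_range_succ]
  rw [hsplit (fun t => f t * (N + 1) ^ (K - 1 - t)), hsplit (fun t => g t * (N + 1) ^ (K - 1 - t))]
  have hA : ∑ t ∈ Finset.range I, f t * (N + 1) ^ (K - 1 - t) =
      ∑ t ∈ Finset.range I, g t * (N + 1) ^ (K - 1 - t) :=
    Finset.sum_congr rfl (fun t ht => by rw [hagree t (Finset.mem_range.mp ht)])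
  have hT : ∑ t ∈ Finset.Ico (I + 1) K, f t * (N + 1) ^ (K - 1 - t) ≤
      ∑ t ∈ Finset.Ico (I + 1) K, N * (N + 1) ^ (K - 1 - t) :=
    Finset.sum_le_sum (fun t ht => by
      have := Finset.mem_Ico.mp ht
      exact Nat.mul_le_mul_right _ (hbound t this.2))
  have hre : ∑ t ∈ Finset.Ico (I + 1) K, N * (N + 1) ^ (K - 1 - t) =
      ∑ j ∈ Finset.range (K - (I + 1)), N * (N + 1) ^ j := by
    refine Finset.sum_nbij' (fun t => K - 1 - t) (fun j => K - 1 - j) ?_ ?_ ?_ ?_ ?_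
    · intro t ht
      simp only [Finset.mem_Ico, Finset.mem_range] at ht ⊢
      omega
    · intro j hj
      simp only [Finset.mem_Ico, Finset.mem_range] at hj ⊢
      omega
    · intro t ht
      simp only [Finset.mem_Ico] at ht
      simp only
      omega
    · intro j hj
      simp only [Finset.mem_range] at hj
      simp only
      omega
    · intro t ht
      rfl
  have hgeom : ∑ j ∈ Finset.range (K - (I + 1)), N * (N + 1) ^ j + 1 = (N + 1) ^ (K - (I + 1)) :=
    pvGeomSum N _
  have hw : (N + 1) ^ (K - (I + 1)) = (N + 1) ^ (K - 1 - I) := by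
    congr 1
    omega
  have hgw : f I * (N + 1) ^ (K - 1 - I) + (N + 1) ^ (K - 1 - I) ≤ g I * (N + 1) ^ (K - 1 - I) := by
    have : (f I + 1) * (N + 1) ^ (K - 1 - I) ≤ g I * (N + 1) ^ (K - 1 - I) :=
      Nat.mul_le_mul_right _ (by omega)
    nlinarith
  omega

lemma pvM_dec (ind : List Int) (N K I : Nat) (hv : pvValid N K ind)
    (hbr : pvBreakAt N K I ind) : pvM N K (pvBump ind (I : Int) (K : Int)) < pvM N K ind := by
  obtain ⟨hblen, hbbd, hbinc⟩ := pvBump_valid ind N K I hv hbr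
  obtain ⟨hlen, hbd, hinc⟩ := hv
  obtain ⟨hIK, hne, hmax⟩ := hbr
  have hg := pvBump_getD ind K I hlen hIK
  unfold pvM
  apply pvDigitLt N K I _ _ hIK
  · intro t ht
    rw [hg t (by omega), if_pos ht]
  · have hbI : (pvBump ind (I : Int) (K : Int)).getD I 0 = ind.getD I 0 + 1 := by
      rw [hg I hIK, if_neg (by omega)]
      simp
    rw [hbI]
    have h1 := (hbd I hIK).2
    have h2 : ind.getD I 0 < pvMaxI N K I := lt_of_le_of_ne h1 hne
    omega
  · intro t ht
    have h1 := (hbbd t ht).1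
    have h2 : pvMaxI N K t - (pvBump ind (I : Int) (K : Int)).getD t 0 ≤ (N : Int) := by
      simp only [pvMaxI] at *
      omega
    omega

lemma pvM_bound (ind : List Int) (N K : Nat) (hK : 0 < K) (hKN : K ≤ N) (hv : pvValid N K ind) :
    pvM N K ind < (N + 1) ^ (K + 1) := by
  obtain ⟨hlen, hbd, hinc⟩ := hv
  have hterm : ∀ t ∈ Finset.range K, (pvMaxI N K t - ind.getD t 0).toNat * (N + 1) ^ (K - 1 - t) ≤
      N * (N + 1) ^ (K - 1) := by
    intro t ht
    have ht' := Finset.mem_range.mp ht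
    have h1 := (hbd t ht').1
    have h2 : (pvMaxI N K t - ind.getD t 0).toNat ≤ N := by
      simp only [pvMaxI] at *
      omega
    exact Nat.mul_le_mul h2 (Nat.pow_le_pow_right (by omega) (by omega))
  have hsum := Finset.sum_le_card_nsmul (Finset.range K) _ _ hterm
  rw [Finset.card_range, smul_eq_mul] at hsum
  have hX : 1 ≤ (N + 1) ^ (K - 1) := Nat.one_le_pow _ _ (by omega)
  have hpow : (N + 1) ^ (K + 1) = (N + 1) * (N + 1) * (N + 1) ^ (K - 1) := by
    have hK1 : K + 1 = (K - 1) + 2 := by omega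
    rw [hK1, pow_add]
    ring
  unfold pvM
  have hNN : N * N + 1 ≤ (N + 1) * (N + 1) := by nlinarith
  calc ∑ t ∈ Finset.range K, (pvMaxI N K t - ind.getD t 0).toNat * (N + 1) ^ (K - 1 - t)
      ≤ K * (N * (N + 1) ^ (K - 1)) := hsum
    _ ≤ N * (N * (N + 1) ^ (K - 1)) := Nat.mul_le_mul_right _ hKN
    _ = (N * N) * (N + 1) ^ (K - 1) := by ring
    _ < (N * N + 1) * (N + 1) ^ (K - 1) := by nlinarith [hX]
    _ ≤ ((N + 1) * (N + 1)) * (N + 1) ^ (K - 1) := Nat.mul_le_mul_right _ hNN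
    _ = (N + 1) ^ (K + 1) := by rw [hpow]

lemma pvLoop_iff (V : List Int) (lo hi : Int) (N K : Nat) (fuel : Nat) (ind : List Int)
    (hv : pvValid N K ind) (hf : pvM N K ind < fuel) :
    pvLoopA V lo hi (K : Int) (N : Int) fuel ind = true ↔
      ∃ c, pvValid N K c ∧ pvLexGt c ind ∧ lo ≤ pvISum V c ∧ pvISum V c ≤ hi := by
  induction fuel generalizing ind with
  | zero => omega
  | succ fuel ih =>
    simp only [pvLoopA]
    rcases hfb : pvFindBreak ind (N : Int) (K : Int) with _ | i
    · have hmax := (pvFindBreak_none ind N K).mp hfb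
      simp only [Bool.false_eq_true, false_iff]
      rintro ⟨c, hc, hgt, -⟩
      exact pvAllMax_top ind c N K hv.1 hmax hc hgt
    · obtain ⟨I, rfl, hIK, hne, hmaxt⟩ := pvFindBreak_some ind N K i hfb
      have hbr : pvBreakAt N K I ind := ⟨hIK, hne, hmaxt⟩
      have hbv := pvBump_valid ind N K I hv hbr
      have hbgt := pvBump_lexGt ind N K I hv hbr
      change (if validate_tracks_length V (pvBump ind (I : Int) (K : Int)) lo hi (K : Int) = true
        then true else pvLoopA V lo hi (K : Int) (N : Int) fuel (pvBump ind (I : Int) (K : Int))) = true ↔ _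
      by_cases hval : validate_tracks_length V (pvBump ind (I : Int) (K : Int)) lo hi (K : Int) = true
      · rw [hval]
        simp only [if_true, true_iff]
        obtain ⟨hs1, hs2⟩ := (pvValidate_iff V _ lo hi K hbv.1).mp hval
        exact ⟨pvBump ind (I : Int) (K : Int), hbv, hbgt, hs1, hs2⟩
      · rw [Bool.not_eq_true] at hval
        rw [hval]
        simp only [Bool.false_eq_true, if_false]
        have hfdec := pvM_dec ind N K I hv hbr
        rw [ih (pvBump ind (I : Int) (K : Int)) hbv (by omega)]
        constructor
        · rintro ⟨c, hc, hgt, hs1, hs2⟩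
          exact ⟨c, hc, pvLexGt_trans c _ ind hgt hbgt, hs1, hs2⟩
        · rintro ⟨c, hc, hgt, hs1, hs2⟩
          rcases pvNoSkip ind c N K I hv hbr hc hgt with h | h
          · exact ⟨c, hc, h, hs1, hs2⟩
          · exfalso
            subst h
            rw [(pvValidate_iff V _ lo hi K hbv.1).mpr ⟨hs1, hs2⟩] at hval
            simp at hval

lemma pvInit_getD (K : Nat) : ∀ t, (PySem.List.pyRange 0 (K : Int) 1).getD t 0 = if t < K then (t : Int) else 0 := by
  intro t
  rw [PySem.List.pyRange_zero_natCast]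
  rcases Nat.lt_or_ge t K with h | h
  · rw [List.getD_eq_getElem _ _ (by simpa using h), if_pos h]
    simp
  · rw [List.getD_eq_default _ _ (by simpa using h), if_neg (by omega)]

lemma pvInit_valid (N K : Nat) (hKN : K ≤ N) :
    pvValid N K (PySem.List.pyRange 0 (K : Int) 1) := by
  have hg := pvInit_getD K
  refine ⟨by rw [PySem.List.pyRange_zero_natCast]; simp, ?_, ?_⟩
  · intro t ht
    rw [hg t, if_pos ht]
    simp only [pvMaxI]
    omega
  · intro t ht
    rw [hg t, if_pos (by omega), hg (t + 1), if_pos ht]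
    omega

lemma pvCheckCore_iff (V : List Int) (lo hi : Int) (K : Nat) (hK : 0 < K) :
    (if (V.length : Int) < (K : Int) then false
     else if validate_tracks_length V (PySem.List.pyRange 0 (K : Int) 1) lo hi (K : Int) = true then true
     else pvLoopA V lo hi (K : Int) (V.length : Int)
       (((V.length : Int).toNat + 1) ^ ((K : Int).toNat + 1)) (PySem.List.pyRange 0 (K : Int) 1)) = true
    ↔ ∃ ind, pvValid V.length K ind ∧ lo ≤ pvISum V ind ∧ pvISum V ind ≤ hi := by
  rcases lt_or_ge (V.length : Int) (K : Int) with hNK | hNK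
  · rw [if_pos hNK]
    simp only [Bool.false_eq_true, false_iff]
    rintro ⟨ind, ⟨hlen, hbd, hinc⟩, -, -⟩
    have hb := hbd (K - 1) (by omega)
    have hc : ((K - 1 : Nat) : Int) = (K : Int) - 1 := by omega
    simp only [pvMaxI, hc] at hb
    omega
  · rw [if_neg (by omega)]
    have hKN : K ≤ V.length := by exact_mod_cast hNK
    have hiv := pvInit_valid V.length K hKN
    have htN : ((V.length : Int)).toNat = V.length := Int.toNat_natCast _
    have htK : ((K : Int)).toNat = K := Int.toNat_natCast _
    by_cases hval : validate_tracks_length V (PySem.List.pyRange 0 (K : Int) 1) lo hi (K : Int) = true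
    · rw [if_pos hval]
      simp only [true_iff]
      obtain ⟨h1, h2⟩ := (pvValidate_iff V _ lo hi K hiv.1).mp hval
      exact ⟨_, hiv, h1, h2⟩
    · rw [if_neg hval]
      rw [htN, htK]
      rw [pvLoop_iff V lo hi V.length K _ _ hiv (pvM_bound _ _ _ hK hKN hiv)]
      constructor
      · rintro ⟨c, hc, -, h1, h2⟩
        exact ⟨c, hc, h1, h2⟩
      · rintro ⟨ind, hvnd, h1, h2⟩
        by_cases heq : ind = PySem.List.pyRange 0 (K : Int) 1
        · exfalso
          apply hval
          rw [← heq]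
          exact (pvValidate_iff V ind lo hi K hvnd.1).mpr ⟨h1, h2⟩
        · refine ⟨ind, hvnd, ?_, h1, h2⟩
          refine pvLexGt_of_pointwise ind _ K hvnd.1 hiv.1 ?_ heq
          intro t ht
          rw [pvInit_getD K t, if_pos ht]
          exact (hvnd.2.1 t ht).1

lemma pvCheckOne_iff (tl : List Int) (lo hi : Int) (K : Nat) (hK : 0 < K) :
    pvCheckOne tl lo hi (K : Int) = true ↔
      ∃ ind, pvValid (tl.filter (fun len =>
          if (K : Int) = 1 then decide (len ≤ hi) else decide (len < hi))).length K ind ∧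
        lo ≤ pvISum (tl.filter (fun len =>
          if (K : Int) = 1 then decide (len ≤ hi) else decide (len < hi))) ind ∧
        pvISum (tl.filter (fun len =>
          if (K : Int) = 1 then decide (len ≤ hi) else decide (len < hi))) ind ≤ hi := by
  exact pvCheckCore_iff _ lo hi K hK

lemma pvCheckOne_neg (tl : List Int) (lo hi : Int) (k : Int) (hk : k < 0) :
    pvCheckOne tl lo hi k = false := by
  have hnil : PySem.List.pyRange 0 k 1 = [] := PySem.List.pyRange_one_eq_nil (by omega)
  have hval : ∀ V : List Int, validate_tracks_length V [] lo hi k = false := by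
    intro V
    simp [validate_tracks_length]
    omega
  have hloop : ∀ (V : List Int) (size : Int) (fuel : Nat),
      pvLoopA V lo hi k size fuel [] = false := by
    intro V size fuel
    cases fuel with
    | zero => rfl
    | succ fuel =>
      simp only [pvLoopA]
      have : pvFindBreak ([] : List Int) size k = none := by
        rw [pvFindBreak, hnil]
        rfl
      rw [this]
  simp only [pvCheckOne]
  rw [if_neg (by
    simp only [not_lt]
    exact le_trans (by omega : k ≤ 0) (Int.natCast_nonneg _)), hnil, hval, hloop]
  simp

lemma pvMonoSum (a : Nat → Int) (K : Nat) (hadj : ∀ t, t + 1 < K → a t < a (t + 1)) :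
    ∀ d i, i + d < K → a i + (d : Int) ≤ a (i + d) := by
  intro d
  induction d with
  | zero => intro i _; simp
  | succ d ihd =>
    intro i hi
    have h1 := ihd i (by omega)
    have h2 := hadj (i + d) (by omega)
    have : i + (d + 1) = (i + d) + 1 := by omega
    rw [this]
    push_cast
    omega

lemma pvValid_iff_good (V : List Int) (lo hi : Int) (K : Nat) :
    (∃ ind, pvValid V.length K ind ∧ lo ≤ pvISum V ind ∧ pvISum V ind ≤ hi) ↔
      pvGood V lo hi K := by
  constructor
  · rintro ⟨ind, ⟨hlen, hbd, hinc⟩, h1, h2⟩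
    have hmono := pvMonoSum (fun t => ind.getD t 0) K hinc
    have hbnd : ∀ t, t < K → 0 ≤ ind.getD t 0 ∧ (ind.getD t 0).toNat < V.length := by
      intro t ht
      obtain ⟨hl, hu⟩ := hbd t ht
      simp only [pvMaxI] at hu
      constructor
      · omega
      · omega
    let f : Fin K → Fin V.length := fun t => ⟨(ind.getD t 0).toNat, (hbnd t t.2).2⟩
    have hpw : (List.ofFn f).Pairwise (· < ·) := by
      rw [List.pairwise_ofFn]
      intro i j hij
      have h3 := hmono (j - i) i (by omega)
      have : i + ((j : Nat) - (i : Nat)) = j := by omega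
      rw [this] at h3
      have hi0 := (hbnd i i.2).1
      have hj0 := (hbnd j j.2).1
      simp only [] at h3
      simp only [f, Fin.mk_lt_mk]
      omega
    have hsub := List.map_getElem_sublist hpw
    have hmeq : (List.ofFn f).map (fun x => V[x]) = ind.map (fun i => PySem.List.pyGetD V i 0) := by
      apply List.ext_getElem
      · simp [hlen]
      · intro t ht1 ht2
        simp only [List.getElem_map, List.getElem_ofFn]
        have htK : t < K := by simpa using ht1
        have h0 := (hbnd t htK).1
        have hN := (hbnd t htK).2
        have hgd : ind[t] = ind.getD t 0 := (List.getD_eq_getElem ind 0 (by omega)).symm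
        rw [hgd, PySem.List.pyGetD_eq_getElem V 0 h0 (by omega)]
        rfl
    refine ⟨ind.map (fun i => PySem.List.pyGetD V i 0), ?_, by simp [hlen], h1, h2⟩
    rw [← hmeq]
    exact hsub
  · rintro ⟨sub, hsub, hlK, h1, h2⟩
    obtain ⟨is, heq, hpw⟩ := List.sublist_eq_map_getElem hsub
    have hisl : is.length = K := by
      have hh := congrArg List.length heq
      simp only [List.length_map] at hh
      omega
    refine ⟨is.map (fun x : Fin V.length => ((x : Nat) : Int)), ?_⟩
    have hindl : (is.map (fun x : Fin V.length => ((x : Nat) : Int))).length = K := by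
      rw [List.length_map, hisl]
    have hget : ∀ u (hu : u < is.length),
        (is.map (fun x : Fin V.length => ((x : Nat) : Int))).getD u 0 = ((is[u]'hu : Nat) : Int) := by
      intro u hu
      rw [List.getD_eq_getElem _ _ (by rw [List.length_map]; exact hu), List.getElem_map]
    have hnn : ∀ u, u < K → 0 ≤ (is.map (fun x : Fin V.length => ((x : Nat) : Int))).getD u 0 ∧
        (is.map (fun x : Fin V.length => ((x : Nat) : Int))).getD u 0 < (V.length : Int) := by
      intro u hu
      have hu' : u < is.length := by omega
      rw [hget u hu']
      exact ⟨Int.natCast_nonneg _, by exact_mod_cast (is[u]'hu').2⟩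
    have hadj : ∀ u, u + 1 < K → (is.map (fun x : Fin V.length => ((x : Nat) : Int))).getD u 0 <
        (is.map (fun x : Fin V.length => ((x : Nat) : Int))).getD (u + 1) 0 := by
      intro u hu
      have ha : u < is.length := by omega
      have hb : u + 1 < is.length := by omega
      rw [hget u ha, hget (u + 1) hb]
      have := (List.pairwise_iff_getElem.mp hpw) u (u + 1) ha hb (by omega)
      exact_mod_cast this
    have hmono := pvMonoSum (fun t => (is.map (fun x : Fin V.length => ((x : Nat) : Int))).getD t 0) K hadj
    refine ⟨⟨hindl, ?_, hadj⟩, ?_⟩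
    · intro t ht
      constructor
      · have h3 := hmono t 0 (by omega)
        simp only [Nat.zero_add] at h3
        have h4 := (hnn 0 (by omega)).1
        omega
      · have h3 := hmono (K - 1 - t) t (by omega)
        have he : t + (K - 1 - t) = K - 1 := by omega
        rw [he] at h3
        have h4 := (hnn (K - 1) (by omega)).2
        simp only [pvMaxI]
        simp only [] at h3
        omega
    · have hsum : (is.map (fun x : Fin V.length => ((x : Nat) : Int))).map
          (fun i => PySem.List.pyGetD V i 0) = sub := by
        rw [heq, List.map_map]
        apply List.ext_getElem
        · simp
        · intro t ht1 ht2
          simp only [List.getElem_map, Function.comp]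
          rw [PySem.List.pyGetD_natCast]
          exact List.getD_eq_getElem V 0 (is[t]'(by simpa using ht1)).2
      rw [pvISum, hsum]
      exact ⟨h1, h2⟩

-- ========== assembly ==========
lemma pvPred_ne_one (K : Nat) (hK : K ≠ 1) (hi : Int) :
    (fun len => if (K : Int) = 1 then decide (len ≤ hi) else decide (len < hi)) =
      (fun v => decide (v < hi)) := by
  funext len
  rw [if_neg (by exact_mod_cast hK)]

lemma pvGood_one (tl : List Int) (lo hi : Int) :
    pvGood (tl.filter (fun v => decide (v ≤ hi))) lo hi 1 ↔ ∃ x ∈ tl, lo ≤ x ∧ x ≤ hi := by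
  constructor
  · rintro ⟨sub, hs, hl, h1, h2⟩
    obtain ⟨a, rfl⟩ := List.length_eq_one_iff.mp hl
    have ha := List.singleton_sublist.mp hs
    rw [List.mem_filter] at ha
    refine ⟨a, ha.1, by simpa using h1, by simpa using h2⟩
  · rintro ⟨x, hx, h1, h2⟩
    exact ⟨[x], List.singleton_sublist.mpr (List.mem_filter.mpr ⟨hx, by simpa using h2⟩),
      rfl, by simpa using h1, by simpa using h2⟩

lemma pvHit_layers (tl : List Int) (lo hi : Int) (kmax c : Nat) (hc : c < kmax + 1) :
    pvHit ((pvDpLayers tl hi kmax).getD c PySem.Set.empty) lo hi = true ↔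
      pvGood (tl.filter (fun v => decide (v < hi))) lo hi c := by
  obtain ⟨hlen, hmem⟩ := pvDpLayers_inv tl hi kmax
  rw [pvHit_iff]
  constructor
  · rintro ⟨s, hsmem, h1, h2⟩
    obtain ⟨sub, hs, hl, rfl⟩ := (hmem c hc s).mp hsmem
    exact ⟨sub, hs, hl, h1, h2⟩
  · rintro ⟨sub, hs, hl, h1, h2⟩
    exact ⟨sub.sum, (hmem c hc sub.sum).mpr ⟨sub, hs, hl, rfl⟩, h1, h2⟩

lemma pvCheckOne_good (tl : List Int) (lo hi : Int) (K : Nat) (hK : 0 < K) :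
    pvCheckOne tl lo hi (K : Int) = true ↔
      pvGood (tl.filter (fun len =>
        if (K : Int) = 1 then decide (len ≤ hi) else decide (len < hi))) lo hi K :=
  (pvCheckOne_iff tl lo hi K hK).trans (pvValid_iff_good _ lo hi K)

lemma pvCheckOne_good_one (tl : List Int) (lo hi : Int) :
    pvCheckOne tl lo hi (1 : Int) = true ↔ ∃ x ∈ tl, lo ≤ x ∧ x ≤ hi := by
  have h := pvCheckOne_good tl lo hi 1 (by omega)
  simp only [Nat.cast_one] at h
  rw [h]
  simp only [if_true]
  rw [pvGood_one]

lemma pvCheckOne_good_ge2 (tl : List Int) (lo hi : Int) (K : Nat) (hK : 2 ≤ K) :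
    pvCheckOne tl lo hi (K : Int) = true ↔
      pvGood (tl.filter (fun v => decide (v < hi))) lo hi K := by
  rw [pvCheckOne_good tl lo hi K (by omega), pvPred_ne_one K (by omega) hi]

lemma pvAnyCount_iff (tl : List Int) (lo hi : Int) :
    pvAnyCount tl lo hi = true ↔
      ((∃ x ∈ tl, lo ≤ x ∧ x ≤ hi) ∨
        ∃ C : Nat, 2 ≤ C ∧ C ≤ tl.length ∧ pvGood (tl.filter (fun v => decide (v < hi))) lo hi C) := by
  rw [pvAnyCount]
  by_cases hcond : pvSingle tl lo hi = true
  · rw [if_pos hcond]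
    simp only [true_iff]
    left
    exact (pvSingle_iff tl lo hi).mp hcond
  · rw [if_neg hcond]
    rw [pvFeasibleTop_iff tl lo hi tl.length _ (fun c hc => by
      rw [PySem.List.mem_pyRange_one] at hc; omega)]
    rw [pvLayerHitAny, List.any_eq_true]
    constructor
    · rintro ⟨c, hc, hhit⟩
      rw [PySem.List.mem_pyRange_one] at hc
      have hc0 : c = ((c.toNat : Nat) : Int) := by omega
      rw [hc0] at hhit
      rw [PySem.List.pyGetD_natCast] at hhit
      right
      exact ⟨c.toNat, by omega, by omega,
        (pvHit_layers tl lo hi tl.length c.toNat (by omega)).mp hhit⟩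
    · rintro (⟨x, hx, h1, h2⟩ | ⟨C, hC2, hCn, hgood⟩)
      · exact absurd ((pvSingle_iff tl lo hi).mpr ⟨x, hx, h1, h2⟩) hcond
      · refine ⟨(C : Int), ?_, ?_⟩
        · rw [PySem.List.mem_pyRange_one]
          constructor
          · exact_mod_cast hC2
          · exact_mod_cast (by omega : (C : Int) < (tl.length : Int) + 1)
        · rw [PySem.List.pyGetD_natCast]
          exact (pvHit_layers tl lo hi tl.length C (by omega)).mpr hgood

lemma pvFalsy_eq (tl : List Int) (lo hi : Int) :
    (PySem.List.pyRange 1 ((tl.length : Int) + 1) 1).any (fun count => pvCheckOne tl lo hi count) =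
      pvAnyCount tl lo hi := by
  rw [Bool.eq_iff_iff, pvAnyCount_iff, List.any_eq_true]
  constructor
  · rintro ⟨c, hc, hone⟩
    rw [PySem.List.mem_pyRange_one] at hc
    have hc0 : c = ((c.toNat : Nat) : Int) := by omega
    rw [hc0] at hone
    rcases Nat.lt_or_ge c.toNat 2 with h2 | h2
    · have h1 : c.toNat = 1 := by omega
      rw [h1] at hone
      simp only [Nat.cast_one] at hone
      exact Or.inl ((pvCheckOne_good_one tl lo hi).mp hone)
    · exact Or.inr ⟨c.toNat, h2, by omega, (pvCheckOne_good_ge2 tl lo hi c.toNat h2).mp hone⟩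
  · rintro (⟨x, hx, h1, h2⟩ | ⟨C, hC2, hCn, hgood⟩)
    · refine ⟨1, ?_, ?_⟩
      · rw [PySem.List.mem_pyRange_one]
        have hn : 1 ≤ tl.length := List.length_pos_iff.mpr (by rintro rfl; simp at hx)
        omega
      · exact (pvCheckOne_good_one tl lo hi).mpr ⟨x, hx, h1, h2⟩
    · refine ⟨(C : Int), ?_, ?_⟩
      · rw [PySem.List.mem_pyRange_one]
        have hc2' : (2 : Int) ≤ (C : Int) := by exact_mod_cast hC2
        have hcn' : (C : Int) ≤ (tl.length : Int) := by exact_mod_cast hCn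
        omega
      · exact (pvCheckOne_good_ge2 tl lo hi C hC2).mpr hgood

lemma pvAlt_none_eq (tl : List Int) (cpl d : Int) :
    check_tracks_length_alt tl cpl none d = pvAnyCount tl (cpl - d) (cpl + d) := rfl

lemma pvMain_some (tl : List Int) (cpl d k : Int) :
    check_tracks_length tl cpl (some k) d = check_tracks_length_alt tl cpl (some k) d := by
  by_cases hk0 : k = 0
  · subst hk0
    simp only [check_tracks_length, check_tracks_length_alt, init_tracks_count]
    norm_num
    exact pvFalsy_eq tl (cpl - d) (cpl + d)
  · rcases lt_trichotomy k 0 with hkneg | hkz | hkpos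
    · -- k < 0 : A runs _check with a negative count, which finds nothing; B returns False
      simp only [check_tracks_length, check_tracks_length_alt, init_tracks_count]
      rw [if_neg hk0]
      have hguard : ((k != 0) && decide ((tl.length : Int) < (some k).getD 0)) = false := by
        simp only [Option.getD_some]
        refine Bool.and_eq_false_iff.mpr (Or.inr ?_)
        simp only [decide_eq_false_iff_not, not_lt]
        exact le_trans (by omega) (Int.natCast_nonneg _)
      rw [hguard]
      simp only [Bool.false_eq_true, if_false, List.any_cons, List.any_nil, Bool.or_false]
      rw [pvCheckOne_neg tl (cpl - d) (cpl + d) k hkneg]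
      rw [if_neg hk0, if_neg (by omega : ¬ k = 1), if_pos (Or.inl hkneg)]
    · omega
    · -- k ≥ 1
      set K : Nat := k.toNat with hKdef
      have hkK : k = (K : Int) := by omega
      have hK1 : 1 ≤ K := by omega
      simp only [check_tracks_length, check_tracks_length_alt, init_tracks_count]
      rw [if_neg hk0, if_neg hk0]
      by_cases hnk : (tl.length : Int) < k
      · rw [if_pos (by simp [hnk, hk0])]
        by_cases hk1 : k = 1
        · subst hk1
          rw [if_pos rfl]
          have htl : tl = [] := by
            have : tl.length = 0 := by omega
            exact List.length_eq_zero_iff.mp this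
          subst htl
          rfl
        · rw [if_neg hk1, if_pos (Or.inr hnk)]
      · rw [if_neg (by simp [hnk])]
        simp only [List.any_cons, List.any_nil, Bool.or_false]
        by_cases hk1 : k = 1
        · subst hk1
          rw [if_pos rfl]
          rw [Bool.eq_iff_iff, pvCheckOne_good_one, pvSingle_iff]
        · rw [if_neg hk1, if_neg (by omega)]
          have hK2 : 2 ≤ K := by omega
          rw [Bool.eq_iff_iff]
          rw [hkK, pvCheckOne_good_ge2 tl (cpl - d) (cpl + d) K hK2]
          rw [pvFeasibleTop_iff tl (cpl - d) (cpl + d) ((K : Int)).toNat [(K : Int)]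
            (fun c hc => by simp at hc; omega)]
          rw [pvLayerHitAny, List.any_cons, List.any_nil, Bool.or_false]
          rw [PySem.List.pyGetD_natCast]
          simp only [Int.toNat_natCast]
          rw [pvHit_layers tl (cpl - d) (cpl + d) K K (by omega)]

lemma pvMain_none (tl : List Int) (cpl d : Int) :
    check_tracks_length tl cpl none d = check_tracks_length_alt tl cpl none d := by
  rw [pvAlt_none_eq]
  simp only [check_tracks_length, init_tracks_count]
  norm_num
  exact pvFalsy_eq tl (cpl - d) (cpl + d)


-- ===== VERDICT (by name: the statement is the Claim_ definition above) =====
theorem check_tracks_length_spec : Claim_equal_check_tracks_length := by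
  intro tracks_length concert_premiere_length tracks_count delta _hdom
  unfold Spec_check_tracks_length
  rcases tracks_count with _ | k
  · exact pvMain_none tracks_length concert_premiere_length delta
  · exact pvMain_some tracks_length concert_premiere_length delta k
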